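-- pv_equiv track=rewrite | github.com/gowthamjidagam/DataStructuresAndAlgorithms | src/SlidingWindow/MaxVowelsSubString.py | maxVowels2
-- ===== SOURCE A (Python) =====
-- def maxVowels2(s, k):
--     vowels = set("aeiou")
--     count = sum(c in vowels for c in s[:k])
--     max_vowels = count
--     for i in range(k, len(s)):
--         count += (s[i] in vowels) - (s[i-k] in vowels)
--         max_vowels = max(max_vowels, count)
--     return max_vowels
-- ===== SOURCE B (Python) =====
-- def maxVowels2(s, k):
--     vowels = frozenset("aeiou")
--     p = [0]
--     for c in s:
--         p.append(p[-1] + (c in vowels))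
--     best = p[min(k, len(s))]
--     for i in range(k, len(s)):
--         best = max(best, p[i + 1] - p[i - k + 1])
--     return best
-- ===== Notes on version B (the rewrite author's own statement) =====
-- stated objective: alternative
-- what changed: B precomputes a prefix-sum array of vowel counts and takes each window count as a difference of two prefix sums, replacing A's incremental add/subtract sliding-window counter.
import Mathlib
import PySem

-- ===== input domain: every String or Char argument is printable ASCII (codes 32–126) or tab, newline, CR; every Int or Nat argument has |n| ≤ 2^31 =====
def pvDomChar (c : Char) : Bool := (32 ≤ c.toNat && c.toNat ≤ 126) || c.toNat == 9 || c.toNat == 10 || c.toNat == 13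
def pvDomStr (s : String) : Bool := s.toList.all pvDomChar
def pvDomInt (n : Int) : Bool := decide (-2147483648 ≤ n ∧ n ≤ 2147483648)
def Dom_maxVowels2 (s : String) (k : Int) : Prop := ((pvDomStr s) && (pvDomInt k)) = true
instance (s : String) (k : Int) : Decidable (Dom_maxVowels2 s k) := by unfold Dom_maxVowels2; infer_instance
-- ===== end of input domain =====

-- B computes each window's vowel count from a prefix-sum table instead of A's incremental sliding counter; same O(n) cost, different decomposition.


-- ===== PORT A =====
def maxVowels2 (s : String) (k : Int) : Int :=
  let vowels : PySem.Set Char := PySem.Set.ofList "aeiou".toList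
  let cs := s.toList
  let count : Int := (PySem.List.slice cs none (some k)).foldl
    (fun acc c => acc + (if c ∈ vowels then (1:Int) else 0)) 0
  let st := (PySem.List.pyRange k (cs.length : Int) 1).foldl
    (fun st i =>
      let c := st.1 + (if PySem.List.pyGetD cs i ' ' ∈ vowels then (1:Int) else 0)
                    - (if PySem.List.pyGetD cs (i - k) ' ' ∈ vowels then (1:Int) else 0)
      (c, max st.2 c)) (count, count)
  st.2

-- ===== PORT B =====
def maxVowels2_alt (s : String) (k : Int) : Int :=
  let vowels : PySem.Set Char := PySem.Set.ofList "aeiou".toList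
  let cs := s.toList
  let p : List Int := cs.foldl
    (fun p c => p ++ [PySem.List.pyGetD p (-1) 0 + (if c ∈ vowels then (1:Int) else 0)]) [0]
  let best := PySem.List.pyGetD p (min k (cs.length : Int)) 0
  (PySem.List.pyRange k (cs.length : Int) 1).foldl
    (fun best i => max best (PySem.List.pyGetD p (i + 1) 0 - PySem.List.pyGetD p (i - k + 1) 0)) best

-- ===== PRECONDITION & SPEC =====
-- Pre_ excludes only k < 0, where the Python A always raises IndexError (s[i] / s[i-k] leave range).
def Pre_maxVowels2 (s : String) (k : Int) : Prop := 0 ≤ k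
instance (s : String) (k : Int) : Decidable (Pre_maxVowels2 s k) := by unfold Pre_maxVowels2; infer_instance
def pvWitness_maxVowels2 : String × Int := ("hello", 2)

def Spec_maxVowels2 (s : String) (k : Int) (out : Int) : Prop := out = maxVowels2_alt s k
instance (s : String) (k : Int) (out : Int) : Decidable (Spec_maxVowels2 s k out) := by unfold Spec_maxVowels2; infer_instance

-- ===== CLAIM (what is proved, stated in full; the proofs are below) =====
def Claim_equal_maxVowels2 : Prop := ∀ (s : String) (k : Int), Dom_maxVowels2 s k → Pre_maxVowels2 s k → Spec_maxVowels2 s k (maxVowels2 s k)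

-- ===== LEMMAS AND PROOFS =====

-- vowel indicator (definitionally the ite both ports use)
def pvV (c : Char) : Int := if c ∈ PySem.Set.ofList "aeiou".toList then 1 else 0

-- prefix vowel count: number of vowels among the first m characters
def pvS (cs : List Char) (m : Nat) : Int := ((cs.take m).map pvV).sum

theorem pvS_clamp (cs : List Char) (m : Nat) (h : cs.length ≤ m) : pvS cs m = pvS cs cs.length := by
  simp only [pvS, List.take_of_length_le h, List.take_of_length_le (le_refl cs.length)]

theorem pvS_succ (cs : List Char) (m : Nat) (h : m < cs.length) :
    pvS cs (m + 1) = pvS cs m + pvV cs[m] := by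
  simp only [pvS, List.take_add_one, List.getElem?_eq_getElem h, Option.toList_some,
    List.map_append, List.sum_append, List.map_cons, List.map_nil, List.sum_cons, List.sum_nil,
    add_zero]

-- B's prefix list is the table of pvS values
theorem pvP_eq (cs : List Char) :
    cs.foldl (fun p c => p ++ [PySem.List.pyGetD p (-1) 0 + pvV c]) [0]
      = (PySem.List.pyRange 0 ((cs.length : Int) + 1) 1).map (fun j => pvS cs j.toNat) := by
  induction cs using List.reverseRecOn with
  | nil => simp [pvS]
  | append_singleton ys c ih =>
    rw [List.foldl_append, ih, List.foldl_cons, List.foldl_nil]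
    have h1 : (PySem.List.pyRange 0 ((ys.length : Int) + 1) 1).map (fun j => pvS ys j.toNat)
        = (PySem.List.pyRange 0 ((ys.length : Int) + 1) 1).map (fun j => pvS (ys ++ [c]) j.toNat) := by
      apply List.map_congr_left
      intro j hj
      rw [PySem.List.mem_pyRange_one] at hj
      have hjn : j.toNat ≤ ys.length := by omega
      simp [pvS, List.take_append_of_le_length hjn]
    rw [h1]
    have h2 : PySem.List.pyRange 0 ((ys.length : Int) + 1) 1
        = PySem.List.pyRange 0 (ys.length : Int) 1 ++ [(ys.length : Int)] := by
      exact PySem.List.pyRange_one_succ_right (by positivity)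
    have h3 : PySem.List.pyRange 0 (((ys ++ [c]).length : Int) + 1) 1
        = PySem.List.pyRange 0 ((ys.length : Int) + 1) 1 ++ [((ys.length : Int) + 1)] := by
      have := PySem.List.pyRange_one_succ_right (a := 0) (b := (ys.length : Int) + 1) (by positivity)
      simpa using this
    rw [h3, List.map_append]
    have h4 : PySem.List.pyGetD
        ((PySem.List.pyRange 0 ((ys.length : Int) + 1) 1).map (fun j => pvS (ys ++ [c]) j.toNat)) (-1) 0
        = pvS (ys ++ [c]) ys.length := by
      rw [h2, List.map_append]
      simp only [List.map_cons, List.map_nil]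
      rw [PySem.List.pyGetD_neg_one_append_singleton]
      simp
    rw [h4]
    simp only [List.map_cons, List.map_nil]
    congr 2
    have : ((ys.length : Int) + 1).toNat = ys.length + 1 := by omega
    rw [this, pvS_succ _ _ (by simp)]
    congr 1
    simp

-- A's sliding loop maintains count = window prefix-sum difference; its max equals B's loop of differences
theorem pvLoop (cs : List Char) (k : Int) (hk : 0 ≤ k) (a m : Int) (hka : k ≤ a) :
    ((PySem.List.pyRange a (cs.length : Int) 1).foldl
      (fun st i =>
        let c := st.1 + pvV (PySem.List.pyGetD cs i ' ') - pvV (PySem.List.pyGetD cs (i - k) ' ')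
        (c, max st.2 c)) (pvS cs a.toNat - pvS cs (a - k).toNat, m)).2
    = (PySem.List.pyRange a (cs.length : Int) 1).foldl
        (fun best i => max best (pvS cs (i + 1).toNat - pvS cs (i - k + 1).toNat)) m := by
  by_cases h : (cs.length : Int) ≤ a
  · rw [PySem.List.pyRange_one_eq_nil h]; rfl
  · push_neg at h
    rw [PySem.List.pyRange_one_cons h]
    rw [List.foldl_cons, List.foldl_cons]
    have hget1 : PySem.List.pyGetD cs a ' ' = cs[a.toNat]'(by omega) :=
      PySem.List.pyGetD_eq_getElem cs ' ' (by omega) (by omega)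
    have hget2 : PySem.List.pyGetD cs (a - k) ' ' = cs[(a - k).toNat]'(by omega) :=
      PySem.List.pyGetD_eq_getElem cs ' ' (by omega) (by omega)
    have hc : pvS cs a.toNat - pvS cs (a - k).toNat
        + pvV (PySem.List.pyGetD cs a ' ') - pvV (PySem.List.pyGetD cs (a - k) ' ')
        = pvS cs (a + 1).toNat - pvS cs (a - k + 1).toNat := by
      rw [hget1, hget2]
      have e1 : (a + 1).toNat = a.toNat + 1 := by omega
      have e2 : (a - k + 1).toNat = (a - k).toNat + 1 := by omega
      rw [e1, e2, pvS_succ cs a.toNat (by omega), pvS_succ cs (a - k).toNat (by omega)]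
      ring
    have := pvLoop cs k hk (a + 1) (max m (pvS cs (a + 1).toNat - pvS cs (a - k + 1).toNat)) (by omega)
    simp only at this ⊢
    rw [hc]
    have e3 : a + 1 - k = a - k + 1 := by ring
    rw [e3] at this
    exact this
termination_by ((cs.length : Int) - a).toNat
decreasing_by omega

-- ===== VERDICT (by name: the statement is the Claim_ definition above) =====
theorem maxVowels2_spec : Claim_equal_maxVowels2 := by
  intro s k _ hk
  have hk : (0:Int) ≤ k := hk
  unfold Spec_maxVowels2 maxVowels2 maxVowels2_alt
  set cs := s.toList with hcs
  simp only
  -- A's initial count is pvS cs k.toNat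
  have hcount : (PySem.List.slice cs none (some k)).foldl
      (fun acc c => acc + (if c ∈ PySem.Set.ofList "aeiou".toList then (1:Int) else 0)) 0
      = pvS cs k.toNat := by
    rw [PySem.List.slice_to cs hk]
    rw [show (fun (acc : Int) (c : Char) => acc + (if c ∈ PySem.Set.ofList "aeiou".toList then (1:Int) else 0))
        = (fun acc c => acc + pvV c) from rfl]
    rw [PySem.List.foldl_add]
    simp [pvS]
  -- B's prefix list
  have hp : cs.foldl
      (fun p c => p ++ [PySem.List.pyGetD p (-1) 0 + (if c ∈ PySem.Set.ofList "aeiou".toList then (1:Int) else 0)]) [0]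
      = (PySem.List.pyRange 0 ((cs.length : Int) + 1) 1).map (fun j => pvS cs j.toNat) := by
    rw [show (fun (p : List Int) (c : Char) => p ++ [PySem.List.pyGetD p (-1) 0 + (if c ∈ PySem.Set.ofList "aeiou".toList then (1:Int) else 0)])
        = (fun p c => p ++ [PySem.List.pyGetD p (-1) 0 + pvV c]) from rfl]
    exact pvP_eq cs
  rw [hcount, hp]
  -- B's initial best is also pvS cs k.toNat
  have hbest : PySem.List.pyGetD
      ((PySem.List.pyRange 0 ((cs.length : Int) + 1) 1).map (fun j => pvS cs j.toNat))
      (min k (cs.length : Int)) 0 = pvS cs k.toNat := by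
    rw [PySem.List.pyGetD_map_pyRange_of_nonneg _ _ _ _ (by omega) (by omega)]
    by_cases hkn : k ≤ (cs.length : Int)
    · rw [min_eq_left hkn]
    · rw [min_eq_right (by omega)]
      simp only [Int.toNat_natCast]
      rw [pvS_clamp cs k.toNat (by omega)]
  rw [hbest]
  -- B's loop body reads the table at in-range indices
  have hbody : (PySem.List.pyRange k (cs.length : Int) 1).foldl
      (fun best i => max best (PySem.List.pyGetD
          ((PySem.List.pyRange 0 ((cs.length : Int) + 1) 1).map (fun j => pvS cs j.toNat)) (i + 1) 0
        - PySem.List.pyGetD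
          ((PySem.List.pyRange 0 ((cs.length : Int) + 1) 1).map (fun j => pvS cs j.toNat)) (i - k + 1) 0))
      (pvS cs k.toNat)
      = (PySem.List.pyRange k (cs.length : Int) 1).foldl
        (fun best i => max best (pvS cs (i + 1).toNat - pvS cs (i - k + 1).toNat)) (pvS cs k.toNat) := by
    apply PySem.List.foldl_congr_mem
    intro acc i hi
    rw [PySem.List.mem_pyRange_one] at hi
    rw [PySem.List.pyGetD_map_pyRange_of_nonneg _ _ _ _ (by omega) (by omega),
        PySem.List.pyGetD_map_pyRange_of_nonneg _ _ _ _ (by omega) (by omega)]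
  rw [hbody]
  -- A's loop equals the same fold of prefix differences
  have hinit : pvS cs k.toNat = pvS cs k.toNat - pvS cs (k - k).toNat := by
    have : (k - k).toNat = 0 := by omega
    simp [pvS]
  have hA := pvLoop cs k hk k (pvS cs k.toNat) (le_refl k)
  rw [← hinit] at hA
  rw [show (fun (st : Int × Int) (i : Int) =>
        ((st.1 + (if PySem.List.pyGetD cs i ' ' ∈ PySem.Set.ofList "aeiou".toList then (1:Int) else 0)
              - (if PySem.List.pyGetD cs (i - k) ' ' ∈ PySem.Set.ofList "aeiou".toList then (1:Int) else 0)),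
         max st.2 (st.1 + (if PySem.List.pyGetD cs i ' ' ∈ PySem.Set.ofList "aeiou".toList then (1:Int) else 0)
              - (if PySem.List.pyGetD cs (i - k) ' ' ∈ PySem.Set.ofList "aeiou".toList then (1:Int) else 0))))
      = (fun st i =>
          let c := st.1 + pvV (PySem.List.pyGetD cs i ' ') - pvV (PySem.List.pyGetD cs (i - k) ' ')
          (c, max st.2 c)) from rfl]
  exact hA
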